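-- pv_equiv track=rewrite | github.com/readjfb/AdventOfCode-2025 | day2/day2_clean.py | check_invalid_v2
-- ===== SOURCE A (Python) =====
-- def check_invalid_v2(n, len_n, split_len):
--     if len_n % split_len:
--         return False
--
--     divisor = 10**split_len
--     n, first = divmod(n, divisor)
--     while n:
--         n, chunk = divmod(n, divisor)
--         if chunk != first:
--             return False
--     return True
-- ===== SOURCE B (Python) =====
-- def check_invalid_v2(n, len_n, split_len):
--     if len_n % split_len:
--         return False
--
--     d = 10 ** split_len
--     c = n % d
--     p = 1
--     while p <= n:
--         p *= d
--     # n consists of repeated chunks c (base d)  <=>  n*(d-1)+c == c*d^k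
--     # with d^k the smallest power of d exceeding n.
--     return n * (d - 1) + c == c * p
-- ===== Notes on version B (the rewrite author's own statement) =====
-- stated objective: alternative
-- what changed: B replaces A's chunk-by-chunk divmod peeling with early return by a closed-form repdigit test: with c = n % d and p the smallest power of d = 10**split_len exceeding n (found by repeated multiplication), all chunks equal c iff n*(d-1)+c == c*p.
-- outside the precondition, e.g. on check_invalid_v2(-5, 2, 1): A returns False, B returns False; on check_invalid_v2(7, 2, -2): A returns False, B does not finish within the time limit
import Mathlib
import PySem

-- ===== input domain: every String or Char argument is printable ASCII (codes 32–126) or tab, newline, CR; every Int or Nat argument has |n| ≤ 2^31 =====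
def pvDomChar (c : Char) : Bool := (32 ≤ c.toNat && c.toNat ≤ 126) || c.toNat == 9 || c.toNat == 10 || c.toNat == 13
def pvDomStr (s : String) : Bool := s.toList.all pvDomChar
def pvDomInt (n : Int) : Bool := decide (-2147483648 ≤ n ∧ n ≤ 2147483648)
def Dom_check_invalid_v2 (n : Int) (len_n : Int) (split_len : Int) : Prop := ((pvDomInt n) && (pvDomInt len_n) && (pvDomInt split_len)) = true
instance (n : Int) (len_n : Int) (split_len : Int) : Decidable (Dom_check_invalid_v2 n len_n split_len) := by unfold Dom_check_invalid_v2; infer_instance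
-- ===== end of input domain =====

-- B replaces A's divmod-peeling loop by a closed-form repdigit test (same asymptotic cost); equivalence is on return values over Pre_.

-- ===== PORT A =====
-- A's while loop: peel a chunk with divmod, early-return False on mismatch.
-- Fuel (m.toNat + 1 at the call site) only makes the recursion total; under Pre_ the
-- loop variable strictly decreases and the fuel branch is never reached.
def pvLoopA (d first : Int) : Nat → Int → Bool
  | 0, _ => false
  | fuel + 1, m =>
    if m = 0 then true
    else
      let m' := PySem.Int.floordiv m d
      let chunk := PySem.Int.mod m d
      if chunk ≠ first then false else pvLoopA d first fuel m'

def check_invalid_v2 (n : Int) (len_n : Int) (split_len : Int) : Bool :=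
  if PySem.Int.mod len_n split_len ≠ 0 then false
  else
    -- 10 ** split_len: exact for split_len ≥ 0 (Pre_ guarantees 1 ≤ split_len on this branch)
    let divisor := (10 : Int) ^ split_len.toNat
    let n1 := PySem.Int.floordiv n divisor
    let first := PySem.Int.mod n divisor
    pvLoopA divisor first (n1.toNat + 1) n1

-- ===== PORT B =====
-- B's while loop: p = 1; while p <= n: p *= d  (fuel n.toNat + 1 only makes it total).
def pvPowLoop (d : Int) : Nat → Int → Int → Int
  | 0, p, _ => p
  | fuel + 1, p, n => if p ≤ n then pvPowLoop d fuel (p * d) n else p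

def check_invalid_v2_alt (n : Int) (len_n : Int) (split_len : Int) : Bool :=
  if PySem.Int.mod len_n split_len ≠ 0 then false
  else
    let d := (10 : Int) ^ split_len.toNat
    let c := PySem.Int.mod n d
    let p := pvPowLoop d (n.toNat + 1) 1 n
    decide (n * (d - 1) + c = c * p)

-- ===== PRECONDITION & SPEC =====
-- Pre_ excludes split_len ≤ 0 past the guard (split_len = 0 raises ZeroDivisionError; split_len < 0
-- makes 10**split_len a float, a value outside the int domain, and B's power loop diverges there)
-- and negative n past the guard, where A's divmod loop diverges (e.g. n = -1 loops forever) or its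
-- False is a floor-divmod artefact; when the guard len_n % split_len != 0 fires, any split_len ≠ 0 and any n are admitted.
def Pre_check_invalid_v2 (n : Int) (len_n : Int) (split_len : Int) : Prop :=
  (PySem.Int.mod len_n split_len ≠ 0 ∧ split_len ≠ 0) ∨ (0 ≤ n ∧ 1 ≤ split_len)
instance (n : Int) (len_n : Int) (split_len : Int) : Decidable (Pre_check_invalid_v2 n len_n split_len) := by
  unfold Pre_check_invalid_v2; infer_instance

def pvWitness_check_invalid_v2 : Int × Int × Int := (222, 3, 1)

def Spec_check_invalid_v2 (n : Int) (len_n : Int) (split_len : Int) (out : Bool) : Prop := out = check_invalid_v2_alt n len_n split_len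
instance (n : Int) (len_n : Int) (split_len : Int) (out : Bool) : Decidable (Spec_check_invalid_v2 n len_n split_len out) := by unfold Spec_check_invalid_v2; infer_instance

-- ===== CLAIM (what is proved, stated in full; the proofs are below) =====
def Claim_equal_check_invalid_v2 : Prop := ∀ (n : Int) (len_n : Int) (split_len : Int), Dom_check_invalid_v2 n len_n split_len → Pre_check_invalid_v2 n len_n split_len → Spec_check_invalid_v2 n len_n split_len (check_invalid_v2 n len_n split_len)

-- ===== LEMMAS AND PROOFS =====

-- pvRep d m = 0…0 repunit in base d with m ones, i.e. (d^m - 1)/(d - 1).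
def pvRep (d : Int) : Nat → Int
  | 0 => 0
  | m + 1 => pvRep d m * d + 1

theorem pvRep_mul (d : Int) (m : Nat) : pvRep d m * (d - 1) + 1 = d ^ m := by
  induction m with
  | zero => simp [pvRep]
  | succ m ih => simp only [pvRep, pow_succ]; linear_combination d * ih

theorem pvRep_nonneg (d : Int) (hd : 2 ≤ d) (m : Nat) : 0 ≤ pvRep d m := by
  induction m with
  | zero => simp [pvRep]
  | succ m ih => simp only [pvRep]; nlinarith

theorem pvRep_lb (d : Int) (hd : 2 ≤ d) (m : Nat) : d ^ m ≤ pvRep d (m + 1) := by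
  induction m with
  | zero => simp [pvRep]
  | succ m ih => simp only [pvRep, pow_succ] at *; nlinarith [pvRep_nonneg d hd m]

theorem pv_div_decomp (x c d : Int) (hd : 0 < d) (hc0 : 0 ≤ c) (hcd : c < d) :
    PySem.Int.floordiv (x * d + c) d = x ∧ PySem.Int.mod (x * d + c) d = c := by
  rw [PySem.Int.floordiv_eq_ediv_of_pos hd, PySem.Int.mod_eq_emod_of_pos hd]
  rw [Int.add_comm (x * d) c]
  constructor
  · rw [Int.add_mul_ediv_right _ _ (by omega : d ≠ 0)]
    rw [Int.ediv_eq_zero_of_lt hc0 hcd]; ring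
  · rw [mul_comm, Int.add_mul_emod_self_left]
    exact Int.emod_eq_of_lt hc0 hcd

-- Characterisation of A's loop: true iff the argument is c·(repunit).
theorem pvLoopA_char (d c : Int) (hd : 2 ≤ d) (hc0 : 0 ≤ c) (hcd : c < d) :
    ∀ (fuel : Nat) (q : Int), 0 ≤ q → q < (fuel : Int) →
      (pvLoopA d c fuel q = true ↔ ∃ m, q = c * pvRep d m) := by
  intro fuel
  induction fuel with
  | zero => intro q hq0 hqf; omega
  | succ fuel ih =>
    intro q hq0 hqf
    by_cases hq : q = 0
    · subst hq
      constructor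
      · intro _; exact ⟨0, by simp [pvRep]⟩
      · intro _; simp [pvLoopA]
    · have hq1 : 1 ≤ q := by omega
      have hdpos : (0:Int) < d := by omega
      have hdiv_lt : PySem.Int.floordiv q d < q := by
        rw [PySem.Int.floordiv_eq_ediv_of_pos hdpos]
        rw [Int.ediv_lt_iff_lt_mul (by omega)]; nlinarith
      have hdiv_nonneg : 0 ≤ PySem.Int.floordiv q d := by
        rw [PySem.Int.floordiv_eq_ediv_of_pos hdpos]
        exact Int.ediv_nonneg hq0 (by omega)
      have ihq := ih (PySem.Int.floordiv q d) hdiv_nonneg (by omega)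
      simp only [pvLoopA, if_neg hq]
      by_cases hmod : PySem.Int.mod q d = c
      · rw [if_neg (by simp [hmod]), ihq]
        constructor
        · rintro ⟨m, hm⟩
          refine ⟨m + 1, ?_⟩
          have : PySem.Int.floordiv q d * d + PySem.Int.mod q d = q :=
            PySem.Int.floordiv_mul_add_mod q d
          rw [hmod, hm] at this
          rw [← this]; simp [pvRep]; ring
        · rintro ⟨m, hm⟩
          rcases m with _ | m
          · simp [pvRep] at hm; omega
          · have hdecomp : q = (c * pvRep d m) * d + c := by
              rw [hm]; simp [pvRep]; ring
            refine ⟨m, ?_⟩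
            have := (pv_div_decomp (c * pvRep d m) c d hdpos hc0 hcd).1
            rw [← hdecomp] at this
            exact this
      · rw [if_pos (by simpa using hmod)]
        simp only [Bool.false_eq_true, false_iff]
        rintro ⟨m, hm⟩
        rcases m with _ | m
        · simp [pvRep] at hm; omega
        · have hdecomp : q = (c * pvRep d m) * d + c := by
            rw [hm]; simp [pvRep]; ring
          have := (pv_div_decomp (c * pvRep d m) c d hdpos hc0 hcd).2
          rw [← hdecomp] at this
          exact hmod this

-- Characterisation of B's power loop.
theorem pvPowLoop_char (d n : Int) (hd : 2 ≤ d) (_hn : 0 ≤ n) :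
    ∀ (fuel : Nat) (p : Int), 1 ≤ p → n + 2 ≤ (fuel : Int) + p →
      ∃ j : Nat, pvPowLoop d fuel p n = p * d ^ j ∧ n < p * d ^ j ∧
        (j = 0 ∨ p * d ^ (j - 1) ≤ n) := by
  intro fuel
  induction fuel with
  | zero =>
    intro p hp hinv
    exact ⟨0, by simp [pvPowLoop], by simpa using (by omega : n < p), Or.inl rfl⟩
  | succ fuel ih =>
    intro p hp hinv
    simp only [pvPowLoop]
    by_cases hple : p ≤ n
    · rw [if_pos hple]
      have hpd : 1 ≤ p * d := by nlinarith
      have hinv' : n + 2 ≤ (fuel : Int) + p * d := by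
        push_cast at hinv ⊢; nlinarith
      obtain ⟨j, h1, h2, h3⟩ := ih (p * d) hpd hinv'
      refine ⟨j + 1, ?_, ?_, ?_⟩
      · rw [h1, pow_succ]; ring
      · rw [pow_succ]; nlinarith [h2]
      · right
        rcases h3 with h3 | h3
        · subst h3; simpa using hple
        · rcases j with _ | j
          · simp at h3; simpa using hple
          · simp only [Nat.add_sub_cancel]
            calc p * d ^ (j + 1) = p * d * d ^ j := by ring
            _ ≤ n := by simpa [Nat.add_sub_cancel] using h3
    · rw [if_neg hple]
      exact ⟨0, by simp, by simpa using (by omega : n < p), Or.inl rfl⟩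

theorem pv_pow_lt_pow (d : Int) (hd : 2 ≤ d) {a b : Nat} (h : d ^ a < d ^ b) : a < b := by
  by_contra hab
  have : d ^ b ≤ d ^ a := pow_le_pow_right₀ (by omega) (by omega)
  omega

-- ===== VERDICT (by name: the statement is the Claim_ definition above) =====
theorem check_invalid_v2_spec : Claim_equal_check_invalid_v2 := by
  intro n len_n split_len _hdom hpre
  unfold Spec_check_invalid_v2 check_invalid_v2 check_invalid_v2_alt
  dsimp only
  by_cases hguard : PySem.Int.mod len_n split_len ≠ 0
  · rw [if_pos hguard, if_pos hguard]
  · rw [if_neg hguard, if_neg hguard]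
    have hns : 0 ≤ n ∧ 1 ≤ split_len := by
      rcases hpre with ⟨h1, _⟩ | h2
      · exact absurd h1 hguard
      · exact h2
    obtain ⟨hn0, hs1⟩ := hns
    set d : Int := (10 : Int) ^ split_len.toNat with hddef
    have hd : 2 ≤ d := by
      have h1 : 1 ≤ split_len.toNat := by omega
      calc (2:Int) ≤ 10 ^ 1 := by norm_num
      _ ≤ 10 ^ split_len.toNat := pow_le_pow_right₀ (by norm_num) h1
    have hdpos : (0:Int) < d := by omega
    set c : Int := PySem.Int.mod n d with hcdef
    have hc0 : 0 ≤ c := by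
      rw [hcdef, PySem.Int.mod_eq_emod_of_pos hdpos]
      exact Int.emod_nonneg n (by omega)
    have hcd : c < d := by
      rw [hcdef, PySem.Int.mod_eq_emod_of_pos hdpos]
      exact Int.emod_lt_of_pos n hdpos
    set n1 : Int := PySem.Int.floordiv n d with hn1def
    have hn1_nonneg : 0 ≤ n1 := by
      rw [hn1def, PySem.Int.floordiv_eq_ediv_of_pos hdpos]
      exact Int.ediv_nonneg hn0 (by omega)
    have hrecomp : n1 * d + c = n := PySem.Int.floordiv_mul_add_mod n d
    -- B side: the power loop
    obtain ⟨j, hploop, hjlt, hjle⟩ :=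
      pvPowLoop_char d n hd hn0 (n.toNat + 1) 1 le_rfl (by push_cast; omega)
    rw [hploop]
    -- A side: loop characterisation
    have hA := pvLoopA_char d c hd hc0 hcd (n1.toNat + 1) n1 hn1_nonneg (by push_cast; omega)
    simp only [one_mul] at hjlt hjle hploop ⊢
    -- reduce Bool equality to iff of the two conditions
    rw [show (pvLoopA d c (n1.toNat + 1) n1 = decide (n * (d - 1) + c = c * d ^ j)) ↔
        ((pvLoopA d c (n1.toNat + 1) n1 = true) ↔ (n * (d - 1) + c = c * d ^ j)) by
      constructor
      · intro h; rw [h]; simp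
      · intro h
        by_cases hb : pvLoopA d c (n1.toNat + 1) n1 = true
        · rw [hb, eq_comm, decide_eq_true_eq]; exact h.mp hb
        · rw [Bool.not_eq_true] at hb; rw [hb, eq_comm, decide_eq_false_iff_not]
          intro hx; exact absurd (h.mpr hx) (by simp [hb])]
    rw [hA]
    constructor
    · rintro ⟨m, hm⟩
      have hnrep : n = c * pvRep d (m + 1) := by
        rw [← hrecomp, hm]; simp [pvRep]; ring
      have hval : n * (d - 1) + c = c * d ^ (m + 1) := by
        have := pvRep_mul d (m + 1)
        nlinarith [hnrep, this]
      rcases eq_or_lt_of_le hc0 with hc | hc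
      · -- c = 0 : then n = 0 and both sides are 0
        have hn0' : n = 0 := by rw [← hc] at hnrep; simpa using hnrep
        rw [hn0', ← hc]; ring
      · -- c ≥ 1 : identify j = m + 1
        have hub : n < d ^ (m + 1) := by
          have := pvRep_mul d (m + 1)
          nlinarith [hnrep, pvRep_nonneg d hd (m + 1)]
        have hlb : d ^ m ≤ n := by
          have := pvRep_lb d hd m
          nlinarith [hnrep]
        have hj1 : j ≠ 0 := by
          intro h0; subst h0
          simp at hjlt
          have : (1:Int) ≤ d ^ m := one_le_pow₀ (by omega)
          omega
        have hjle' : d ^ (j - 1) ≤ n := by rcases hjle with h | h; omega; exact h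
        have hjm : j = m + 1 := by
          have h1 : j - 1 < m + 1 := pv_pow_lt_pow d hd (by omega)
          have h2 : m < j := pv_pow_lt_pow d hd (by omega)
          omega
        rw [hval, hjm]
    · intro hval
      rcases eq_or_lt_of_le hc0 with hc | hc
      · -- c = 0 : n*(d-1) = 0 forces n = 0
        have hn : n = 0 := by
          rw [← hc] at hval
          have h1 : n * (d - 1) = 0 := by linarith
          rcases mul_eq_zero.mp h1 with h | h
          · exact h
          · omega
        refine ⟨0, ?_⟩
        have hn1 : n1 = 0 := by
          rw [hn1def, hn, PySem.Int.floordiv_eq_ediv_of_pos hdpos]; simp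
        rw [hn1, ← hc]; simp [pvRep]
      · have hj1 : j ≠ 0 := by
          intro h0; subst h0
          simp at hjlt
          have hn : n = 0 := by omega
          rw [hn] at hrecomp
          nlinarith [hn1_nonneg]
        obtain ⟨j', rfl⟩ : ∃ j', j = j' + 1 := ⟨j - 1, by omega⟩
        have hnrep : n = c * pvRep d (j' + 1) := by
          have hmul := pvRep_mul d (j' + 1)
          have h1 : n * (d - 1) = c * (pvRep d (j' + 1) * (d - 1)) := by nlinarith
          have h2 : (d - 1) ≠ 0 := by omega
          have := mul_right_cancel₀ h2 (by linarith [h1] : n * (d - 1) = (c * pvRep d (j' + 1)) * (d - 1))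
          exact this
        refine ⟨j', ?_⟩
        have hdecomp : n = (c * pvRep d j') * d + c := by
          rw [hnrep]; simp [pvRep]; ring
        have := (pv_div_decomp (c * pvRep d j') c d hdpos hc0 hcd).1
        rw [← hdecomp] at this
        rw [hn1def, this]
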